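-- pv_equiv track=rewrite | github.com/Neo-101-zz/R2S | ndbc/getwind/ndbc_download.py | year_filter
-- ===== SOURCE A (Python) =====
-- def year_filter(input):
--     """Filter the inputted year.
--
--     Parameters
--     ----------
--     input : str
--         Inputted string of target year.
--
--     Returns
--     -------
--     set of str
--         Return a set of str, e.g. {'1997', '1999', '2000'}.
--
--     """
--     if not input:
--         return set()
--     if not input.count(' '):
--         # single input
--         if not input.count('-'):
--             res = set()
--             res.add(input)
--         # range input
--         else:
--             begin = int(input.split('-')[0])
--             end = int(input.split('-')[1])
--             res = set([str(x) for x in range(begin, end+1)])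
--     # hybrid input
--     else:
--         parts = input.replace('  ', ' ').split(' ')
--         res = set()
--         for part in parts:
--             temp = year_filter(part)
--             res.update(temp)
--
--     return res
-- ===== SOURCE B (Python) =====
-- def year_filter(input):
--     """Filter the inputted year: iterative token loop instead of recursion."""
--     if not input:
--         return set()
--     res = set()
--     for tok in input.replace('  ', ' ').split(' '):
--         if not tok:
--             continue
--         if '-' in tok:
--             begin = int(tok.split('-')[0])
--             end = int(tok.split('-')[1])
--             res.update(str(x) for x in range(begin, end + 1))
--         else:
--             res.add(tok)
--     return res
-- ===== Notes on version B (the rewrite author's own statement) =====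
-- stated objective: simpler
-- what changed: Replaces A's recursion and its no-space/space branch split by a single non-recursive loop over the replace-then-split token list, handling empty/dash/plain tokens inline.
-- outside the precondition, e.g. on year_filter('-'): A raises ValueError, B raises ValueError
import Mathlib
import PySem

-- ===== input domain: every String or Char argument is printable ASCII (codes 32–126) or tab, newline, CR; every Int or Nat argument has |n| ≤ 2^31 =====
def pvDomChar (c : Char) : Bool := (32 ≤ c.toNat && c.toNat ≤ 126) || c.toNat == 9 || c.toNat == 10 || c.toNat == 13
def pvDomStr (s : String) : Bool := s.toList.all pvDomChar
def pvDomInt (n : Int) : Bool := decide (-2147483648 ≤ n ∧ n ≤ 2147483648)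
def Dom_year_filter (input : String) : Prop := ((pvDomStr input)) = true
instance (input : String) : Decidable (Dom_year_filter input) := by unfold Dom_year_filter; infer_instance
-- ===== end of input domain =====

-- B replaces A's recursion (and its no-space/space branch split) by a single token loop; objective: simpler.
-- Pre_ excludes inputs on which Python A raises ValueError (a '-'-containing token whose first two dash-split
-- pieces are not both int()-parseable); both ports are total via a default that Pre_ makes unreachable.

-- ===== PORT A =====
-- A is recursive; the recursion depth is bounded by the structure (split parts contain no separator), so the
-- port carries a fuel counter len+1 that merely makes the same computation total (never exhausted on any input).
def yfA_go : Nat → String → List String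
  | 0, _ => []
  | fuel+1, input =>
    if PySem.Str.len input == 0 then PySem.Set.empty
    else if PySem.Str.count input " " == 0 then
      if PySem.Str.count input "-" == 0 then
        PySem.Set.add PySem.Set.empty input
      else
        -- input.split('-') : sep is a nonempty literal, split? is always some
        let parts := (PySem.Str.split? input "-").getD []
        -- int(parts[0]) / int(parts[1]) : getD defaults are unreachable under Pre_
        let b := (PySem.Int.ofStr? (parts.getD 0 "")).getD 0
        let e := (PySem.Int.ofStr? (parts.getD 1 "")).getD 0
        PySem.Set.ofList ((PySem.List.pyRange b (e+1) 1).map PySem.Int.toStr)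
    else
      let parts := (PySem.Str.split? (PySem.Str.replace input "  " " ") " ").getD []
      parts.foldl (fun res part => PySem.Set.update res (yfA_go fuel part)) PySem.Set.empty

def year_filter (input : String) : List String :=
  yfA_go (input.toList.length + 1) input

-- ===== PORT B =====
def year_filter_alt (input : String) : List String :=
  if PySem.Str.len input == 0 then PySem.Set.empty
  else
    ((PySem.Str.split? (PySem.Str.replace input "  " " ") " ").getD []).foldl
      (fun res tok =>
        if PySem.Str.len tok == 0 then res
        else if PySem.Str.isIn "-" tok then
          let parts := (PySem.Str.split? tok "-").getD []
          let b := (PySem.Int.ofStr? (parts.getD 0 "")).getD 0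
          let e := (PySem.Int.ofStr? (parts.getD 1 "")).getD 0
          PySem.Set.update res ((PySem.List.pyRange b (e+1) 1).map PySem.Int.toStr)
        else PySem.Set.add res tok)
      PySem.Set.empty

-- ===== PRECONDITION & SPEC =====
-- Pre_ excludes exactly the inputs on which Python A raises ValueError: some token (of the
-- replace-then-split token list; equal to [input] when input has no space) contains '-' but
-- its first or second dash-split piece is not a valid int() literal.
def Pre_year_filter (input : String) : Prop :=
  ∀ t ∈ (PySem.Str.split? (PySem.Str.replace input "  " " ") " ").getD [],
    PySem.Str.isIn "-" t = true →
      ((PySem.Int.ofStr? (((PySem.Str.split? t "-").getD []).getD 0 "")).isSome = true ∧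
       (PySem.Int.ofStr? (((PySem.Str.split? t "-").getD []).getD 1 "")).isSome = true)
instance (input : String) : Decidable (Pre_year_filter input) := by unfold Pre_year_filter; infer_instance
def pvWitness_year_filter : String := "1997 1999-2001"
def Spec_year_filter (input : String) (out : List String) : Prop := out = year_filter_alt input
instance (input : String) (out : List String) : Decidable (Spec_year_filter input out) := by unfold Spec_year_filter; infer_instance

-- ===== CLAIM (what is proved, stated in full; the proofs are below) =====
def Claim_equal_year_filter : Prop := ∀ (input : String), Dom_year_filter input → Pre_year_filter input → Spec_year_filter input (year_filter input)

-- ===== LEMMAS AND PROOFS =====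

-- counting a single-character substring is List.count
theorem countGo_eq (d : Char) : ∀ (fuel : Nat) (l : List Char) (acc : Nat), l.length ≤ fuel →
    PySem.Chars.count.go [d] fuel l acc = acc + l.count d
  | 0, l, acc, h => by
    have : l = [] := List.eq_nil_of_length_eq_zero (Nat.le_zero.mp h)
    subst this; simp [PySem.Chars.count.go]
  | fuel+1, [], acc, _ => by simp [PySem.Chars.count.go]
  | fuel+1, c :: t, acc, h => by
    by_cases hc : d = c
    · have hp : [d].isPrefixOf (c :: t) = true := by simp [List.isPrefixOf, hc]
      simp only [PySem.Chars.count.go, hp, if_pos, List.length_cons, List.length_nil,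
        Nat.zero_add, List.drop_one, List.tail_cons]
      rw [countGo_eq d fuel t (acc+1) (by simpa using Nat.le_of_succ_le_succ h)]
      have : (c :: t).count d = t.count d + 1 := by simp [hc]
      omega
    · have hc' : (d == c) = false := beq_eq_false_iff_ne.mpr hc
      have hp : [d].isPrefixOf (c :: t) = false := by simp [List.isPrefixOf, hc']
      simp only [PySem.Chars.count.go, hp]
      rw [if_neg (by simp), countGo_eq d fuel t acc (by simpa using Nat.le_of_succ_le_succ h)]
      have : (c :: t).count d = t.count d := by
        simp only [List.count_cons]
        rw [show (c == d) = false from by rw [beq_eq_false_iff_ne]; exact fun hh => hc hh.symm]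
        simp
      omega

theorem count_singleton (s : List Char) (d : Char) : PySem.Chars.count s [d] = s.count d := by
  simp [PySem.Chars.count, countGo_eq d s.length s 0 (le_refl _)]

-- replace("  ", " ") is the identity on space-free strings
theorem replaceGo_id : ∀ (fuel : Nat) (l acc : List Char), ' ' ∉ l →
    PySem.Chars.replace.go [' ', ' '] [' '] fuel l acc = acc.reverse ++ l
  | 0, l, acc, _ => by simp [PySem.Chars.replace.go]
  | fuel+1, [], acc, _ => by simp [PySem.Chars.replace.go]
  | fuel+1, c :: t, acc, h => by
    have hc : c ≠ ' ' := fun hc => h (hc ▸ List.mem_cons_self ..)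
    have hc' : (' ' == c) = false := by
      simp only [beq_eq_false_iff_ne, ne_eq]
      intro hh; exact hc hh.symm
    have hp : [' ', ' '].isPrefixOf (c :: t) = false := by
      simp [List.isPrefixOf, hc']
    simp only [PySem.Chars.replace.go, hp]
    rw [if_neg (by simp), replaceGo_id fuel t (c :: acc) (fun hm => h (List.mem_cons_of_mem _ hm))]
    simp

theorem replace_nospace (s : List Char) (h : ' ' ∉ s) :
    PySem.Chars.replace s [' ', ' '] [' '] = s := by
  simp [PySem.Chars.replace, replaceGo_id s.length s [] h]

-- split(' ') of a space-free string is the singleton list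
theorem splitGo_nospace : ∀ (fuel : Nat) (l cur : List Char) (acc : List (List Char)), ' ' ∉ l →
    PySem.Chars.splitOn.go [' '] fuel l cur acc = ((cur.reverse ++ l) :: acc).reverse
  | 0, l, cur, acc, _ => by simp [PySem.Chars.splitOn.go]
  | fuel+1, [], cur, acc, _ => by simp [PySem.Chars.splitOn.go]
  | fuel+1, c :: t, cur, acc, h => by
    have hc : c ≠ ' ' := fun hc => h (hc ▸ List.mem_cons_self ..)
    have hc' : (' ' == c) = false := by
      simp only [beq_eq_false_iff_ne, ne_eq]
      intro hh; exact hc hh.symm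
    have hp : [' '].isPrefixOf (c :: t) = false := by
      simp [List.isPrefixOf, hc']
    simp only [PySem.Chars.splitOn.go, hp]
    rw [if_neg (by simp), splitGo_nospace fuel t (c :: cur) acc (fun hm => h (List.mem_cons_of_mem _ hm))]
    simp

theorem splitOn_nospace (s : List Char) (h : ' ' ∉ s) :
    PySem.Chars.splitOn s [' '] = [s] := by
  simp [PySem.Chars.splitOn, splitGo_nospace (s.length + 1) s [] [] h]

-- every piece of split(' ') is space-free
theorem splitGo_mem : ∀ (fuel : Nat) (l cur : List Char) (acc : List (List Char)),
    l.length < fuel → ' ' ∉ cur → (∀ p ∈ acc, ' ' ∉ p) →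
    ∀ p ∈ PySem.Chars.splitOn.go [' '] fuel l cur acc, ' ' ∉ p
  | fuel+1, [], cur, acc, _, hcur, hacc => by
    simp only [PySem.Chars.splitOn.go]
    intro p hp
    rw [List.mem_reverse] at hp
    rcases List.mem_cons.mp hp with h | h
    · subst h; simpa using hcur
    · exact hacc p h
  | fuel+1, c :: t, cur, acc, hlt, hcur, hacc => by
    by_cases hc : c = ' '
    · subst hc
      have hp : [' '].isPrefixOf (' ' :: t) = true := by simp [List.isPrefixOf]
      simp only [PySem.Chars.splitOn.go, hp, if_pos, List.length_cons, List.length_nil,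
        Nat.zero_add, List.drop_one, List.tail_cons]
      refine splitGo_mem fuel t [] (cur.reverse :: acc)
        (by simpa using Nat.lt_of_succ_lt_succ hlt) (by simp) ?_
      intro p hp'
      rcases List.mem_cons.mp hp' with h | h
      · subst h; simpa using hcur
      · exact hacc p h
    · have hc' : (' ' == c) = false := by
        rw [beq_eq_false_iff_ne]
        intro hh; exact hc hh.symm
      have hp : [' '].isPrefixOf (c :: t) = false := by simp [List.isPrefixOf, hc']
      simp only [PySem.Chars.splitOn.go, hp]
      rw [if_neg (by simp)]
      refine splitGo_mem fuel t (c :: cur) acc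
        (by simpa using Nat.lt_of_succ_lt_succ hlt) ?_ hacc
      intro hm
      rcases List.mem_cons.mp hm with h | h
      · exact hc h.symm
      · exact hcur h

theorem splitOn_mem (s : List Char) : ∀ p ∈ PySem.Chars.splitOn s [' '], ' ' ∉ p := by
  simpa [PySem.Chars.splitOn] using
    splitGo_mem (s.length + 1) s [] [] (Nat.lt_succ_self _) (by simp) (by simp)

-- '[d] in s' is membership
theorem infix_singleton (s : List Char) (d : Char) : [d] <:+: s ↔ d ∈ s := by
  constructor
  · intro h; exact h.mem (List.mem_singleton_self d)
  · intro h
    obtain ⟨l1, l2, rfl⟩ := List.append_of_mem h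
    exact ⟨l1, l2, by simp⟩

theorem isIn_singleton (s : List Char) (d : Char) :
    PySem.Chars.isIn [d] s = true ↔ d ∈ s := by
  rw [show PySem.Chars.isIn [d] s = (PySem.Chars.find s [d] != -1) from rfl]
  rw [bne_iff_ne, ne_eq, PySem.Chars.find_eq_neg_one_iff, infix_singleton]
  tauto

-- the token list used by both ports, on list level
theorem split_getD_map (s sep : String) (h : sep.toList ≠ []) :
    ((PySem.Str.split? s sep).getD []).map String.toList = PySem.Chars.splitOn s.toList sep.toList := by
  have := PySem.Str.split?_map s sep
  rw [show PySem.Chars.split? s.toList sep.toList = some (PySem.Chars.splitOn s.toList sep.toList) by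
    simp [PySem.Chars.split?, List.isEmpty_iff, h]] at this
  cases hs : PySem.Str.split? s sep with
  | none => rw [hs] at this; simp at this
  | some ts => rw [hs] at this; simpa using this

theorem tokens_map (s : String) :
    ((PySem.Str.split? s " ").getD []).map String.toList = PySem.Chars.splitOn s.toList [' '] := by
  rw [split_getD_map s " " (by decide), show (" " : String).toList = [' '] from by decide]

-- Set facts specific to the two folds
theorem update_ofList {α : Type} [BEq α] [LawfulBEq α] (res : PySem.Set α) (L : List α) :
    PySem.Set.update res (PySem.Set.ofList L) = PySem.Set.update res L := by
  rw [PySem.Set.update_eq_append_filter, PySem.Set.update_eq_append_filter, PySem.Set.ofList_ofList]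

theorem update_single {α : Type} [BEq α] [LawfulBEq α] (res : PySem.Set α) (x : α) :
    PySem.Set.update res (PySem.Set.add PySem.Set.empty x) = PySem.Set.add res x := by
  have : PySem.Set.add (PySem.Set.empty : PySem.Set α) x = [x] := by
    simp [PySem.Set.add, PySem.Set.empty, PySem.Set.contains]
  rw [this, PySem.Set.update_eq_foldl]
  rfl

-- straight-line facts about a single token
theorem len_eq_zero_beq (t : String) : (PySem.Str.len t == 0) = (t.toList.isEmpty) := by
  rw [PySem.Str.len_eq]
  cases ht : t.toList with
  | nil => simp
  | cons a l =>
    have h1 : (((a :: l).length : Int) == 0) = false := by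
      rw [beq_eq_false_iff_ne]
      simp only [List.length_cons]
      push_cast
      omega
    rw [h1]
    simp

theorem count_space_zero (t : String) (h : ' ' ∉ t.toList) : PySem.Str.count t " " = 0 := by
  rw [PySem.Str.count_eq, show (" " : String).toList = [' '] from rfl, count_singleton]
  exact List.count_eq_zero.mpr h

theorem count_dash_beq (t : String) : (PySem.Str.count t "-" == 0) = !(PySem.Str.isIn "-" t) := by
  rw [PySem.Str.count_eq, PySem.Str.isIn_eq, show ("-" : String).toList = ['-'] from rfl,
    count_singleton]
  by_cases h : '-' ∈ t.toList
  · rw [(isIn_singleton t.toList '-').mpr h]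
    simp [List.count_eq_zero, h]
  · rw [show PySem.Chars.isIn ['-'] t.toList = false from by
      cases hb : PySem.Chars.isIn ['-'] t.toList
      · rfl
      · exact absurd ((isIn_singleton t.toList '-').mp hb) h]
    simp [List.count_eq_zero, h]

-- one token of the loop: A's recursive call, union'd in, is B's loop body
theorem step_eq (g : Nat) (tok : String) (h : ' ' ∉ tok.toList) (res : List String) :
    PySem.Set.update res (yfA_go (g+1) tok) =
      (if PySem.Str.len tok == 0 then res
       else if PySem.Str.isIn "-" tok then
         PySem.Set.update res ((PySem.List.pyRange
           ((PySem.Int.ofStr? (((PySem.Str.split? tok "-").getD []).getD 0 "")).getD 0)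
           (((PySem.Int.ofStr? (((PySem.Str.split? tok "-").getD []).getD 1 "")).getD 0)+1) 1).map
           PySem.Int.toStr)
       else PySem.Set.add res tok) := by
  by_cases h0 : tok.toList = []
  · have hb : (PySem.Str.len tok == 0) = true := by rw [len_eq_zero_beq]; simp [h0]
    simp only [yfA_go, hb, if_pos]
    rw [PySem.Set.update_eq_foldl]
    rfl
  · have hb : (PySem.Str.len tok == 0) = false := by
      rw [len_eq_zero_beq]; simpa using h0
    have hsp : (PySem.Str.count tok " " == 0) = true := by
      rw [count_space_zero tok h]
      rfl
    simp only [yfA_go, hb, hsp, if_pos, if_neg, Bool.false_eq_true, not_false_iff]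
    rw [count_dash_beq]
    cases hd : PySem.Str.isIn "-" tok
    · simp only [Bool.not_false, if_pos, if_neg, Bool.false_eq_true, not_false_iff]
      exact update_single res tok
    · simp only [Bool.not_true, Bool.false_eq_true, if_neg, not_false_iff, if_pos]
      exact update_ofList res _

-- ===== VERDICT (by name: the statement is the Claim_ definition above) =====
theorem main_eq (input : String) : year_filter input = year_filter_alt input := by
  by_cases h0 : input.toList = []
  · have hb : (PySem.Str.len input == 0) = true := by rw [len_eq_zero_beq]; simp [h0]
    simp only [year_filter, yfA_go, year_filter_alt, hb, if_pos]
  · have hb : (PySem.Str.len input == 0) = false := by rw [len_eq_zero_beq]; simpa using h0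
    by_cases hsp : ' ' ∈ input.toList
    · -- hybrid branch: both sides fold over the same token list
      have hspc : (PySem.Str.count input " " == 0) = false := by
        rw [PySem.Str.count_eq, show (" " : String).toList = [' '] from by decide, count_singleton]
        simpa [List.count_eq_zero] using hsp
      obtain ⟨n, hn⟩ : ∃ n, input.toList.length = n + 1 := by
        cases hl : input.toList with
        | nil => exact absurd hl h0
        | cons a l => exact ⟨l.length, by simp⟩
      simp only [year_filter, yfA_go, year_filter_alt, hb, hspc, Bool.false_eq_true, if_neg,
        not_false_iff, hn]
      apply PySem.List.foldl_congr_mem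
      intro acc x hx
      have hxs : ' ' ∉ x.toList := by
        have hmap := tokens_map (PySem.Str.replace input "  " " ")
        exact splitOn_mem _ _ (hmap ▸ List.mem_map_of_mem hx)
      exact step_eq n x hxs acc
    · -- no-space branch: the token list is [input]
      have hr : (PySem.Str.replace input "  " " ").toList = input.toList := by
        rw [PySem.Str.toList_replace, show ("  " : String).toList = [' ', ' '] from by decide,
          show (" " : String).toList = [' '] from by decide]
        exact replace_nospace _ hsp
      have hmap := tokens_map (PySem.Str.replace input "  " " ")
      rw [hr, splitOn_nospace _ hsp] at hmap
      have hspc : (PySem.Str.count input " " == 0) = true := by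
        rw [count_space_zero input hsp]
        rfl
      have hT : (PySem.Str.split? (PySem.Str.replace input "  " " ") " ").getD [] = [input] := by
        cases hTv : (PySem.Str.split? (PySem.Str.replace input "  " " ") " ").getD [] with
        | nil => rw [hTv] at hmap; simp at hmap
        | cons t ts =>
          rw [hTv] at hmap
          cases ts with
          | cons u us => simp at hmap
          | nil =>
            simp only [List.map_cons, List.map_nil, List.cons.injEq, and_true] at hmap
            rw [String.toList_inj.mp hmap]
      simp only [year_filter, yfA_go, year_filter_alt, hb, hspc, Bool.false_eq_true, if_neg,
        not_false_iff, if_pos, hT, List.foldl_cons, List.foldl_nil]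
      rw [count_dash_beq]
      cases hd : PySem.Str.isIn "-" input
      · simp only [Bool.not_false, if_pos, Bool.false_eq_true, if_neg, not_false_iff]
      · simp only [Bool.not_true, Bool.false_eq_true, if_neg, not_false_iff, if_pos]
        rw [show (PySem.Set.empty : PySem.Set String) = [] from rfl, PySem.Set.update_nil_left]

-- ===== VERDICT (by name: the statement is the Claim_ definition above) =====
theorem year_filter_spec : Claim_equal_year_filter := by
  intro input _dom _pre
  exact main_eq input
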